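-- pv_equiv track=rewrite | github.com/djpandit007/box-box-box | src/boxboxbox/audio/tts.py | parse_dialogue_lines
-- ===== SOURCE A (Python) =====
-- def parse_dialogue_lines(text: str) -> list[tuple[str, str]]:
--     """
--     Parse canonical digest dialogue format into (speaker, text) pairs.
--
--     Input:  "Lead: [excited] What a race!\nAnalyst: [analytical] The strategy was key."
--     Output: [("Lead", "[excited] What a race!"), ("Analyst", "[analytical] The strategy was key.")]
--     """
--     lines = []
--     for raw in text.strip().splitlines():
--         raw = raw.strip()
--         if raw.startswith("Lead: "):
--             lines.append(("Lead", raw[len("Lead: ") :]))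
--         elif raw.startswith("Analyst: "):
--             lines.append(("Analyst", raw[len("Analyst: ") :]))
--     return lines
-- ===== SOURCE B (Python) =====
-- SPEAKERS = {"Lead", "Analyst"}
--
--
-- def parse_dialogue_lines(text: str) -> list[tuple[str, str]]:
--     pairs = []
--     for raw in text.strip().splitlines():
--         parts = raw.strip().split(": ", 1)
--         if len(parts) == 2 and parts[0] in SPEAKERS:
--             pairs.append((parts[0], parts[1]))
--     return pairs
-- ===== Notes on version B (the rewrite author's own statement) =====
-- stated objective: idiomatic
-- what changed: Replaces the per-speaker startswith/len-slice branch pair with a single maxsplit-1 delimiter split whose head is checked against a speaker set, so adding a speaker means extending the set, not adding a branch.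
import Mathlib
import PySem

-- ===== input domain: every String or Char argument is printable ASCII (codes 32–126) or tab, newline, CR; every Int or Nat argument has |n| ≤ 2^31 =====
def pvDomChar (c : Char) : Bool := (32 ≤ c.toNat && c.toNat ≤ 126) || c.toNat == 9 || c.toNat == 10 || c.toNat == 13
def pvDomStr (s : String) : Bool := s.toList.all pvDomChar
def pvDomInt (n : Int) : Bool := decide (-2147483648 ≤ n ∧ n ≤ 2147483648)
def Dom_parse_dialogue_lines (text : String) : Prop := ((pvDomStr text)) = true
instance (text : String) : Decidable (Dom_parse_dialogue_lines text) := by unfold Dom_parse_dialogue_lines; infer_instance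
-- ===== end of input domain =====

-- B replaces A's two startswith/slice branches with one maxsplit-1 delimiter split checked against a speaker set (idiomatic; same cost).


-- ===== PORT A =====
-- literal port of A: loop over text.strip().splitlines(); raw.strip(); two startswith branches
-- with slices raw[6:] / raw[9:] (len("Lead: ") = 6, len("Analyst: ") = 9)
def parse_dialogue_lines (text : String) : List (String × String) :=
  (PySem.Str.splitlines (PySem.Str.strip text)).foldl
    (fun lines raw0 =>
      let raw := PySem.Str.strip raw0
      if PySem.Str.startswith raw "Lead: " then
        lines ++ [("Lead", PySem.Str.slice raw (some 6) none)]
      else if PySem.Str.startswith raw "Analyst: " then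
        lines ++ [("Analyst", PySem.Str.slice raw (some 9) none)]
      else lines)
    []

-- ===== PORT B =====
def SPEAKERS : PySem.Set String := PySem.Set.ofList ["Lead", "Analyst"]

-- literal port of B: parts = raw.strip().split(": ", 1); keep when len(parts) == 2 and parts[0] in SPEAKERS
def parse_dialogue_lines_alt (text : String) : List (String × String) :=
  (PySem.Str.splitlines (PySem.Str.strip text)).foldl
    (fun pairs raw0 =>
      match PySem.Str.splitMax? (PySem.Str.strip raw0) ": " 1 with
      | some [sp, rest] => if sp ∈ SPEAKERS then pairs ++ [(sp, rest)] else pairs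
      | _ => pairs)
    []

-- ===== PRECONDITION & SPEC =====
def Spec_parse_dialogue_lines (text : String) (out : List (String × String)) : Prop := out = parse_dialogue_lines_alt text
instance (text : String) (out : List (String × String)) : Decidable (Spec_parse_dialogue_lines text out) := by unfold Spec_parse_dialogue_lines; infer_instance

-- ===== CLAIM (what is proved, stated in full; the proofs are below) =====
def Claim_equal_parse_dialogue_lines : Prop := ∀ (text : String), Dom_parse_dialogue_lines text → Spec_parse_dialogue_lines text (parse_dialogue_lines text)

-- ===== LEMMAS AND PROOFS =====

-- go with exhausted maxsplit budget returns the rest as one final piece, whatever the fuel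
lemma go_zero (sep : List Char) (fuel : Nat) (l cur : List Char) (acc : List (List Char)) :
    PySem.Chars.splitOnMax.go sep fuel 0 l cur acc = ((cur.reverse ++ l) :: acc).reverse := by
  cases fuel <;> cases l <;> simp [PySem.Chars.splitOnMax.go.eq_def]

-- one consuming step of go when the separator does not start here
lemma go_consume (sep : List Char) (fuel : Nat) (hf : fuel ≠ 0) (c : Char) (rest cur : List Char)
    (acc : List (List Char)) (h : ¬ (sep.isPrefixOf (c :: rest) = true)) :
    PySem.Chars.splitOnMax.go sep fuel 1 (c :: rest) cur acc =
      PySem.Chars.splitOnMax.go sep (fuel - 1) 1 rest (c :: cur) acc := by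
  obtain ⟨f, rfl⟩ := Nat.exists_eq_succ_of_ne_zero hf
  rw [PySem.Chars.splitOnMax.go.eq_def]
  simp [h]

-- the splitting step of go (budget 1) when the separator starts here
lemma go_found (sep : List Char) (fuel : Nat) (hf : fuel ≠ 0) (c : Char) (rest cur : List Char)
    (acc : List (List Char)) (h : sep.isPrefixOf (c :: rest) = true) :
    PySem.Chars.splitOnMax.go sep fuel 1 (c :: rest) cur acc =
      acc.reverse ++ [cur.reverse, (c :: rest).drop sep.length] := by
  obtain ⟨f, rfl⟩ := Nat.exists_eq_succ_of_ne_zero hf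
  rw [PySem.Chars.splitOnMax.go.eq_def]
  simp [h, go_zero]

-- running go over the literal prefix "Lead: " splits exactly there
lemma go_lead (rest : List Char) (fuel : Nat) (hf : 5 ≤ fuel) :
    PySem.Chars.splitOnMax.go [':', ' '] fuel 1 ("Lead: ".toList ++ rest) [] [] =
      ["Lead".toList, rest] := by
  rw [show ("Lead: ".toList ++ rest) = 'L' :: 'e' :: 'a' :: 'd' :: ':' :: ' ' :: rest by rfl]
  rw [go_consume _ fuel (by omega) _ _ _ _ (by simp [List.isPrefixOf]),
      go_consume _ (fuel - 1) (by omega) _ _ _ _ (by simp [List.isPrefixOf]),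
      go_consume _ (fuel - 1 - 1) (by omega) _ _ _ _ (by simp [List.isPrefixOf]),
      go_consume _ (fuel - 1 - 1 - 1) (by omega) _ _ _ _ (by simp [List.isPrefixOf]),
      go_found _ (fuel - 1 - 1 - 1 - 1) (by omega) _ _ _ _ (by simp [List.isPrefixOf])]
  simp

-- running go over the literal prefix "Analyst: " splits exactly there
lemma go_analyst (rest : List Char) (fuel : Nat) (hf : 8 ≤ fuel) :
    PySem.Chars.splitOnMax.go [':', ' '] fuel 1 ("Analyst: ".toList ++ rest) [] [] =
      ["Analyst".toList, rest] := by
  rw [show ("Analyst: ".toList ++ rest) = 'A' :: 'n' :: 'a' :: 'l' :: 'y' :: 's' :: 't' :: ':' :: ' ' :: rest by rfl]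
  rw [go_consume _ fuel (by omega) _ _ _ _ (by simp [List.isPrefixOf]),
      go_consume _ (fuel - 1) (by omega) _ _ _ _ (by simp [List.isPrefixOf]),
      go_consume _ (fuel - 1 - 1) (by omega) _ _ _ _ (by simp [List.isPrefixOf]),
      go_consume _ (fuel - 1 - 1 - 1) (by omega) _ _ _ _ (by simp [List.isPrefixOf]),
      go_consume _ (fuel - 1 - 1 - 1 - 1) (by omega) _ _ _ _ (by simp [List.isPrefixOf]),
      go_consume _ (fuel - 1 - 1 - 1 - 1 - 1) (by omega) _ _ _ _ (by simp [List.isPrefixOf]),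
      go_consume _ (fuel - 1 - 1 - 1 - 1 - 1 - 1) (by omega) _ _ _ _ (by simp [List.isPrefixOf]),
      go_found _ (fuel - 1 - 1 - 1 - 1 - 1 - 1 - 1) (by omega) _ _ _ _ (by simp [List.isPrefixOf])]
  simp

-- on a line starting with "Lead: ", B's split yields exactly A's speaker and slice
lemma split_lead (raw : String) (h : PySem.Str.startswith raw "Lead: " = true) :
    PySem.Str.splitMax? raw ": " 1 = some ["Lead", PySem.Str.slice raw (some 6) none] := by
  rw [PySem.Str.startswith_eq] at h
  obtain ⟨rest, hr⟩ := (PySem.Chars.startswith_iff _ _).mp h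
  have hgo : PySem.Chars.splitMax? raw.toList [':',' '] 1 = some ["Lead".toList, rest] := by
    simp only [PySem.Chars.splitMax?, PySem.Chars.splitOnMax]
    rw [if_neg (by decide), if_neg (by decide), show ((1:Int).toNat) = 1 from rfl, ← hr,
      go_lead rest _ (by rw [hr, ← hr]; simp)]
  have hslice : PySem.Str.slice raw (some 6) none = String.ofList rest := by
    apply String.toList_inj.mp
    rw [String.toList_ofList, PySem.Str.toList_slice, PySem.Chars.slice_eq_listSlice,
      PySem.List.slice_from _ (by omega), show ((6:Int).toNat) = 6 from rfl, ← hr]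
    simp
  simp [PySem.Str.splitMax?, hgo, hslice]

-- on a line starting with "Analyst: ", B's split yields exactly A's speaker and slice
lemma split_analyst (raw : String) (h : PySem.Str.startswith raw "Analyst: " = true) :
    PySem.Str.splitMax? raw ": " 1 = some ["Analyst", PySem.Str.slice raw (some 9) none] := by
  rw [PySem.Str.startswith_eq] at h
  obtain ⟨rest, hr⟩ := (PySem.Chars.startswith_iff _ _).mp h
  have hgo : PySem.Chars.splitMax? raw.toList [':',' '] 1 = some ["Analyst".toList, rest] := by
    simp only [PySem.Chars.splitMax?, PySem.Chars.splitOnMax]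
    rw [if_neg (by decide), if_neg (by decide), show ((1:Int).toNat) = 1 from rfl, ← hr,
      go_analyst rest _ (by rw [hr, ← hr]; simp)]
  have hslice : PySem.Str.slice raw (some 9) none = String.ofList rest := by
    apply String.toList_inj.mp
    rw [String.toList_ofList, PySem.Str.toList_slice, PySem.Chars.slice_eq_listSlice,
      PySem.List.slice_from _ (by omega), show ((9:Int).toNat) = 9 from rfl, ← hr]
    simp
  simp [PySem.Str.splitMax?, hgo, hslice]

-- shape of a budget-1 split: one piece, or two pieces reassembling the input around sep
lemma go_shape (sep : List Char) (fuel : Nat) :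
    ∀ (l cur : List Char),
      PySem.Chars.splitOnMax.go sep fuel 1 l cur [] = [cur.reverse ++ l] ∨
      ∃ a b, PySem.Chars.splitOnMax.go sep fuel 1 l cur [] = [cur.reverse ++ a, b] ∧
        l = a ++ sep ++ b := by
  induction fuel with
  | zero => intro l cur; left; simp [PySem.Chars.splitOnMax.go.eq_def]
  | succ f ih =>
    intro l cur
    cases l with
    | nil => left; simp [PySem.Chars.splitOnMax.go.eq_def]
    | cons c rest =>
      by_cases h : sep.isPrefixOf (c :: rest) = true
      · right
        obtain ⟨t, ht⟩ := (List.isPrefixOf_iff_prefix).mp h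
        refine ⟨[], (c :: rest).drop sep.length, ?_, ?_⟩
        · rw [go_found sep (f + 1) (by omega) c rest cur [] h]; simp
        · rw [← ht]; simp
      · rw [go_consume sep (f + 1) (by omega) c rest cur [] h]
        simp only [Nat.add_sub_cancel]
        rcases ih rest (c :: cur) with h1 | ⟨a, b, h2, h3⟩
        · left; simp [h1]
        · right; exact ⟨c :: a, b, by simpa using h2, by simp [h3]⟩

-- on a line with neither speaker prefix, B's split-and-filter keeps nothing
lemma split_other (raw : String) (h1 : ¬ PySem.Str.startswith raw "Lead: " = true)
    (h2 : ¬ PySem.Str.startswith raw "Analyst: " = true) (pairs : List (String × String)) :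
    (match PySem.Str.splitMax? raw ": " 1 with
     | some [sp, rest] => if sp ∈ SPEAKERS then pairs ++ [(sp, rest)] else pairs
     | _ => pairs) = pairs := by
  have hsw : ∀ (p : String) (b : List Char), raw.toList = p.toList ++ b →
      PySem.Str.startswith raw p = true := by
    intro p b hb
    rw [PySem.Str.startswith_eq]
    exact (PySem.Chars.startswith_iff _ _).mpr ⟨b, hb.symm⟩
  rcases go_shape [':',' '] (raw.toList.length + 1) raw.toList [] with hs | ⟨a, b, hs, hab⟩
  · have hsplit : PySem.Str.splitMax? raw ": " 1 = some [String.ofList raw.toList] := by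
      simp only [PySem.Str.splitMax?, PySem.Chars.splitMax?, PySem.Chars.splitOnMax]
      rw [if_neg (by decide), if_neg (by decide), show ((1:Int).toNat) = 1 from rfl]
      simpa using congrArg (fun l => Option.map (List.map String.ofList) (some l)) hs
    rw [hsplit]
  · have hsplit : PySem.Str.splitMax? raw ": " 1 =
        some [String.ofList a, String.ofList b] := by
      simp only [PySem.Str.splitMax?, PySem.Chars.splitMax?, PySem.Chars.splitOnMax]
      rw [if_neg (by decide), if_neg (by decide), show ((1:Int).toNat) = 1 from rfl]
      simpa using congrArg (fun l => Option.map (List.map String.ofList) (some l)) hs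
    rw [hsplit]
    simp only []
    rw [if_neg]
    intro hmem
    have hmem' := (PySem.Set.mem_ofList _ _).mp hmem
    simp only [List.mem_cons, List.not_mem_nil, or_false] at hmem'
    rcases hmem' with he | he
    · apply h1
      apply hsw "Lead: " b
      have ha : a = "Lead".toList := by
        have := congrArg String.toList he; simpa using this
      rw [hab, ha]; rfl
    · apply h2
      apply hsw "Analyst: " b
      have ha : a = "Analyst".toList := by
        have := congrArg String.toList he; simpa using this
      rw [hab, ha]; rfl

-- the two loop bodies agree on every line
lemma step_eq (pairs : List (String × String)) (raw0 : String) :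
    (let raw := PySem.Str.strip raw0
     if PySem.Str.startswith raw "Lead: " then
       pairs ++ [("Lead", PySem.Str.slice raw (some 6) none)]
     else if PySem.Str.startswith raw "Analyst: " then
       pairs ++ [("Analyst", PySem.Str.slice raw (some 9) none)]
     else pairs) =
    (match PySem.Str.splitMax? (PySem.Str.strip raw0) ": " 1 with
     | some [sp, rest] => if sp ∈ SPEAKERS then pairs ++ [(sp, rest)] else pairs
     | _ => pairs) := by
  set raw := PySem.Str.strip raw0 with hraw
  clear_value raw
  simp only []
  by_cases h1 : PySem.Str.startswith raw "Lead: " = true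
  · rw [if_pos h1, split_lead raw h1]
    have : "Lead" ∈ SPEAKERS := by decide
    simp [this]
  · rw [if_neg h1]
    by_cases h2 : PySem.Str.startswith raw "Analyst: " = true
    · rw [if_pos h2, split_analyst raw h2]
      have : "Analyst" ∈ SPEAKERS := by decide
      simp [this]
    · rw [if_neg h2, split_other raw h1 h2 pairs]

theorem parse_dialogue_lines_spec_aux (text : String) :
    parse_dialogue_lines text = parse_dialogue_lines_alt text := by
  rw [parse_dialogue_lines, parse_dialogue_lines_alt,
    funext (fun pairs => funext (fun raw0 => step_eq pairs raw0))]

-- ===== VERDICT (by name: the statement is the Claim_ definition above) =====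
theorem parse_dialogue_lines_spec : Claim_equal_parse_dialogue_lines := by
  intro text _
  show parse_dialogue_lines text = parse_dialogue_lines_alt text
  exact parse_dialogue_lines_spec_aux text
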